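-- pv_equiv track=rewrite | github.com/JunseoMin/Coding_Test | CodingTest_Py/WeIrD_StRiNg.py | solution
-- ===== SOURCE A (Python) =====
-- def solution(s):
--     ans=[]
--     s=s.upper()
--     slist=s.split(" ")
--     for ss in slist:
--         i=0
--         anss=''
--         for l in ss:
--             if(i%2):
--                 anss+=l.lower()
--             else: anss+=l
--             i+=1
--         ans.append(anss)
--     return ' '.join(ans)
-- ===== SOURCE B (Python) =====
-- def solution(s):
--     out = []
--     pos = 0
--     for ch in s.upper():
--         if ch == ' ':
--             out.append(ch)
--             pos = 0
--         else:
--             out.append(ch.lower() if pos % 2 else ch)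
--             pos += 1
--     return ''.join(out)
-- ===== Notes on version B (the rewrite author's own statement) =====
-- stated objective: simpler
-- what changed: Replaces the split-then-per-word-indexed-loop-then-join structure with a single linear pass over the uppercased string that keeps a word-position counter reset at each separator.
import Mathlib
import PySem

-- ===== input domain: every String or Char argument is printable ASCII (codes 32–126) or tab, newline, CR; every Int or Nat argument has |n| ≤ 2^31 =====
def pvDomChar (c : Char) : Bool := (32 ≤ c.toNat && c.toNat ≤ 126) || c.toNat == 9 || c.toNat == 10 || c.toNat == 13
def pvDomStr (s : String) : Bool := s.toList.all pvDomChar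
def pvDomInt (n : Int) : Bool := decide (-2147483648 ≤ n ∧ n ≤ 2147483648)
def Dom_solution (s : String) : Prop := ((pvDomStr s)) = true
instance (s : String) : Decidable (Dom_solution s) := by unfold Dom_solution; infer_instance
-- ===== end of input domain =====

-- B replaces A's split-then-per-word-loop-then-join with one linear pass over the
-- uppercased string keeping a word-position counter reset on spaces (simpler decomposition).


-- ===== PORT A =====
-- A: s = s.upper(); split on ' '; per word, indexed loop lowering odd positions; ' '.join
def solution (s : String) : String :=
  let su := PySem.Str.upper s
  let slist := PySem.Chars.splitOn su.toList [' ']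
  let ans := slist.foldl (fun (ans : List (List Char)) ss =>
    let r := ss.foldl (fun (p : Int × List Char) l =>
      (p.1 + 1, if p.1 % 2 ≠ 0 then p.2 ++ [PySem.Chars.lowerChar l] else p.2 ++ [l]))
      ((0 : Int), ([] : List Char))
    ans ++ [r.2]) ([] : List (List Char))
  String.mk (PySem.Chars.join [' '] ans)

-- ===== PORT B =====
-- B: one pass over the uppercased string with a resettable word-position counter
def solution_alt (s : String) : String :=
  let up := (PySem.Str.upper s).toList
  let r := up.foldl (fun (st : Int × List Char) ch =>
    if ch = ' ' then ((0 : Int), st.2 ++ [ch])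
    else (st.1 + 1, st.2 ++ [if st.1 % 2 ≠ 0 then PySem.Chars.lowerChar ch else ch]))
    ((0 : Int), ([] : List Char))
  String.mk r.2

-- ===== PRECONDITION & SPEC =====
def Spec_solution (s : String) (out : String) : Prop := out = solution_alt s
instance (s : String) (out : String) : Decidable (Spec_solution s out) := by unfold Spec_solution; infer_instance

-- ===== CLAIM (what is proved, stated in full; the proofs are below) =====
def Claim_equal_solution : Prop := ∀ (s : String), Dom_solution s → Spec_solution s (solution s)

-- ===== LEMMAS AND PROOFS =====

-- (head, tail) of the split of l on ' '
def mySplitP : List Char → List Char × List (List Char)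
  | [] => ([], [])
  | c :: rest =>
    let p := mySplitP rest
    if c = ' ' then ([], p.1 :: p.2) else (c :: p.1, p.2)

-- A's per-word indexed transform, recursively
def wf (i : Int) : List Char → List Char
  | [] => []
  | c :: cs => (if i % 2 ≠ 0 then PySem.Chars.lowerChar c else c) :: wf (i + 1) cs

-- B's single pass, recursively
def gg (p : Int) : List Char → List Char
  | [] => []
  | c :: cs =>
    if c = ' ' then ' ' :: gg 0 cs
    else (if p % 2 ≠ 0 then PySem.Chars.lowerChar c else c) :: gg (p + 1) cs

theorem go_eq (fuel : Nat) : ∀ (l cur : List Char) (acc : List (List Char)),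
    l.length < fuel →
    PySem.Chars.splitOn.go [' '] fuel l cur acc
      = acc.reverse ++ (cur.reverse ++ (mySplitP l).1) :: (mySplitP l).2 := by
  induction fuel with
  | zero => intro l cur acc h; omega
  | succ f ih =>
    intro l cur acc h
    cases l with
    | nil => simp [PySem.Chars.splitOn.go, mySplitP]
    | cons c rest =>
      by_cases hc : c = ' '
      · subst hc
        have hpre : List.isPrefixOf [' '] (' ' :: rest) = true := by
          simp [List.isPrefixOf]
        rw [PySem.Chars.splitOn.go]
        simp only [hpre, if_true, List.length_cons, List.length_nil, List.drop_succ_cons,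
          List.drop_zero]
        rw [ih rest [] (cur.reverse :: acc) (by simpa using Nat.lt_of_succ_lt_succ h)]
        simp [mySplitP]
      · have hpre : List.isPrefixOf [' '] (c :: rest) = false := by
          simp [List.isPrefixOf]; exact fun hh => hc hh.symm
        rw [PySem.Chars.splitOn.go]
        simp only [hpre, Bool.false_eq_true, if_false]
        rw [ih rest (c :: cur) acc (by simpa using Nat.lt_of_succ_lt_succ h)]
        simp [mySplitP, hc]

theorem splitOn_eq (l : List Char) :
    PySem.Chars.splitOn l [' '] = (mySplitP l).1 :: (mySplitP l).2 := by
  unfold PySem.Chars.splitOn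
  rw [go_eq (l.length + 1) l [] [] (Nat.lt_succ_self _)]
  simp

theorem innerFold_eq (w : List Char) : ∀ (i : Int) (acc : List Char),
    (w.foldl (fun (p : Int × List Char) l =>
      (p.1 + 1, if p.1 % 2 ≠ 0 then p.2 ++ [PySem.Chars.lowerChar l] else p.2 ++ [l]))
      (i, acc)).2 = acc ++ wf i w := by
  induction w with
  | nil => intro i acc; simp [wf]
  | cons c cs ih =>
    intro i acc
    simp only [List.foldl_cons, wf]
    rw [ih (i + 1)]
    by_cases h : i % 2 ≠ 0 <;> simp [h]

theorem outerFold_eq (ws : List (List Char)) : ∀ (a : List (List Char)),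
    ws.foldl (fun (ans : List (List Char)) ss =>
      let r := ss.foldl (fun (p : Int × List Char) l =>
        (p.1 + 1, if p.1 % 2 ≠ 0 then p.2 ++ [PySem.Chars.lowerChar l] else p.2 ++ [l]))
        ((0 : Int), ([] : List Char))
      ans ++ [r.2]) a = a ++ ws.map (wf 0) := by
  induction ws with
  | nil => intro a; simp
  | cons w ws ih =>
    intro a
    simp only [List.foldl_cons, List.map_cons]
    rw [ih, innerFold_eq w 0 []]
    simp

theorem bFold_eq (cs : List Char) : ∀ (p : Int) (acc : List Char),
    (cs.foldl (fun (st : Int × List Char) ch =>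
      if ch = ' ' then ((0 : Int), st.2 ++ [ch])
      else (st.1 + 1, st.2 ++ [if st.1 % 2 ≠ 0 then PySem.Chars.lowerChar ch else ch]))
      (p, acc)).2 = acc ++ gg p cs := by
  induction cs with
  | nil => intro p acc; simp [gg]
  | cons c cs ih =>
    intro p acc
    by_cases hc : c = ' '
    · subst hc
      simp only [List.foldl_cons, reduceIte, gg]
      rw [ih 0]; simp
    · simp only [List.foldl_cons, if_neg hc, gg]
      rw [ih (p + 1)]; simp

theorem join_cons_head (sep : List Char) (c : Char) (u : List Char)
    (ws : List (List Char)) :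
    PySem.Chars.join sep ((c :: u) :: ws) = c :: PySem.Chars.join sep (u :: ws) := by
  cases ws with
  | nil => simp [PySem.Chars.join_singleton]
  | cons w ws => simp [PySem.Chars.join_cons_cons]

theorem join_eq_gg (cs : List Char) : ∀ (p : Int),
    PySem.Chars.join [' '] (wf p (mySplitP cs).1 :: ((mySplitP cs).2).map (wf 0))
      = gg p cs := by
  induction cs with
  | nil => intro p; simp [mySplitP, wf, gg, PySem.Chars.join_singleton]
  | cons c cs ih =>
    intro p
    by_cases hc : c = ' '
    · subst hc
      simp only [mySplitP, reduceIte, gg, List.map_cons, wf]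
      rw [PySem.Chars.join_cons_cons, ← ih 0]
      simp
    · simp only [mySplitP, if_neg hc, gg, wf]
      rw [join_cons_head, ← ih (p + 1)]

-- ===== VERDICT (by name: the statement is the Claim_ definition above) =====
theorem solution_spec : Claim_equal_solution := by
  intro s _
  unfold Spec_solution
  dsimp only [solution, solution_alt]
  rw [splitOn_eq, outerFold_eq, bFold_eq]
  simp only [List.nil_append, List.map_cons]
  rw [join_eq_gg]
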